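-- pv_equiv track=rewrite | github.com/KasperskyLab/BuildMigrator | build_migrator/generators/_cmake/remove_redundant_directory_targets.py | _get_directories_created_by_file
-- ===== SOURCE A (Python) =====
-- def _get_directories_created_by_file(output):
--     accumulator = ""
--     results = []
--     for leaf in output.split("/")[:-1]:
--         if accumulator:
--             accumulator += "/"
--         accumulator += leaf
--         results.append(accumulator)
--     return results
-- ===== SOURCE B (Python) =====
-- def _get_directories_created_by_file(output):
--     segments = output.split("/")[:-1]
--     return ["/".join(segments[:i + 1]) for i in range(len(segments))]
-- ===== Notes on version B (the rewrite author's own statement) =====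
-- stated objective: simpler
-- what changed: Replaces the running string accumulator threaded through the loop by a single split into segments plus a comprehension that builds each cumulative prefix independently as '/'.join of a slice.
-- intended difference: On paths whose first '/'-separated segment is empty with at least two segments before the file name (i.e. absolute-style outputs such as '/a/b'), A's truthiness test on the empty accumulator silently drops the leading slash and returns ['', 'a'], while B returns the genuine cumulative prefixes ['', '/a'], which are the directories the path actually denotes. — e.g. on _get_directories_created_by_file("/a/b"): A returns ["", "a"], B returns ["", "/a"]
import Mathlib
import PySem

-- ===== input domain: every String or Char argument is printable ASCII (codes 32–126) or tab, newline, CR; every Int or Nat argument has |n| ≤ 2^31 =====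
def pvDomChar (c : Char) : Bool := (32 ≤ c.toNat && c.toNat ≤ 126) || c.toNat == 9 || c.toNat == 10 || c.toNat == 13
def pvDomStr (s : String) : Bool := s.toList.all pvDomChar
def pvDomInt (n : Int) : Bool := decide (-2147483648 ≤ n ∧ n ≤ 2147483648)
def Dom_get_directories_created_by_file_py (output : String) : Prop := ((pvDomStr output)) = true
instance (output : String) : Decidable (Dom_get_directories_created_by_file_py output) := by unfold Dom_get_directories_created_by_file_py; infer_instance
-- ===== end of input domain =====

-- B replaces A's running accumulator by '/'-join over slices of the split segments (objective: simpler);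
-- on absolute-style paths A drops the leading '/' — stated as the intended difference D_ below.

-- ===== PORT A =====
-- one loop iteration of A: extend the accumulator (adding '/' only if it is non-empty) and append it
def pvStepA (st : List Char × List (List Char)) (leaf : List Char) : List Char × List (List Char) :=
  let acc := if st.1 ≠ [] then st.1 ++ ['/'] else st.1
  let acc := acc ++ leaf
  (acc, st.2 ++ [acc])

def get_directories_created_by_file_py (output : String) : List String :=
  let leaves := PySem.List.slice (PySem.Chars.splitOn output.toList ['/']) none (some (-1))
  ((leaves.foldl pvStepA ([], [])).2).map (fun cs => String.ofList cs)

-- ===== PORT B =====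
def get_directories_created_by_file_py_alt (output : String) : List String :=
  let segments := PySem.List.slice (PySem.Chars.splitOn output.toList ['/']) none (some (-1))
  (PySem.List.pyRange 0 segments.length 1).map (fun i =>
    String.ofList (PySem.Chars.join ['/'] (PySem.List.slice segments none (some (i + 1)))))

-- ===== PRECONDITION & SPEC =====
-- On outputs whose path part has an empty first '/'-segment and at least two segments (absolute-style
-- paths such as "/a/b"), A's truthiness test on the empty accumulator drops the leading slash and
-- returns ["", "a"], while B returns the genuine cumulative prefixes ["", "/a"], the directories the
-- path actually denotes — B's value is the intended one.
def D_get_directories_created_by_file_py (output : String) : Prop :=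
  ((PySem.Chars.splitOn output.toList ['/']).dropLast).head? = some [] ∧
  2 ≤ ((PySem.Chars.splitOn output.toList ['/']).dropLast).length
instance (output : String) : Decidable (D_get_directories_created_by_file_py output) := by
  unfold D_get_directories_created_by_file_py; infer_instance

def Spec_get_directories_created_by_file_py (output : String) (out : List String) : Prop :=
  ¬ D_get_directories_created_by_file_py output → out = get_directories_created_by_file_py_alt output
instance (output : String) (out : List String) : Decidable (Spec_get_directories_created_by_file_py output out) := by
  unfold Spec_get_directories_created_by_file_py; infer_instance

def pvDiffWitness_get_directories_created_by_file_py : String := "/a/b"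
def pvDiffWitnessOut_get_directories_created_by_file_py : (List String) × (List String) :=
  (["", "a"], ["", "/a"])

-- ===== CLAIM (what is proved, stated in full; the proofs are below) =====
def Claim_unchanged_get_directories_created_by_file_py : Prop :=
  ∀ (output : String), Dom_get_directories_created_by_file_py output →
    Spec_get_directories_created_by_file_py output (get_directories_created_by_file_py output)
def Claim_changed_get_directories_created_by_file_py : Prop :=
  Dom_get_directories_created_by_file_py (pvDiffWitness_get_directories_created_by_file_py) ∧
  D_get_directories_created_by_file_py (pvDiffWitness_get_directories_created_by_file_py) ∧
  get_directories_created_by_file_py (pvDiffWitness_get_directories_created_by_file_py) = pvDiffWitnessOut_get_directories_created_by_file_py.1 ∧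
  get_directories_created_by_file_py_alt (pvDiffWitness_get_directories_created_by_file_py) = pvDiffWitnessOut_get_directories_created_by_file_py.2 ∧
  pvDiffWitnessOut_get_directories_created_by_file_py.1 ≠ pvDiffWitnessOut_get_directories_created_by_file_py.2
def Claim_exact_get_directories_created_by_file_py : Prop :=
  ∀ (output : String), Dom_get_directories_created_by_file_py output →
    D_get_directories_created_by_file_py output →
    get_directories_created_by_file_py output ≠ get_directories_created_by_file_py_alt output

-- ===== LEMMAS AND PROOFS =====

lemma join_cons_of_ne (x : List Char) {ys : List (List Char)} (h : ys ≠ []) :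
    PySem.Chars.join ['/'] (x :: ys) = x ++ '/' :: PySem.Chars.join ['/'] ys := by
  cases ys with
  | nil => exact absurd rfl h
  | cons b t => rw [PySem.Chars.join_cons_cons]; simp

lemma foldA_res (l : List (List Char)) (acc : List Char) (res : List (List Char)) (h : acc ≠ []) :
    (l.foldl pvStepA (acc, res)).2 =
      res ++ (List.range l.length).map
        (fun k => acc ++ '/' :: PySem.Chars.join ['/'] (l.take (k + 1))) := by
  induction l generalizing acc res with
  | nil => simp
  | cons x t ih =>
    have hstep : pvStepA (acc, res) x = (acc ++ '/' :: x, res ++ [acc ++ '/' :: x]) := by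
      simp [pvStepA, h]
    have hne : acc ++ '/' :: x ≠ [] := by simp
    rw [List.foldl_cons, hstep, ih _ _ hne, List.append_assoc, List.singleton_append,
      List.length_cons, List.range_succ_eq_map, List.map_cons]
    congr 1
    congr 1
    · simp [PySem.Chars.join_singleton]
    · rw [List.map_map]
      apply List.map_congr_left
      intro k hk
      simp only [Function.comp]
      have ht : t ≠ [] := by
        intro hnil; subst hnil; simp at hk
      have htake : t.take (k + 1) ≠ [] := by
        simp [List.take_eq_nil_iff, ht]
      rw [List.take_succ_cons, join_cons_of_ne x htake]
      simp

lemma foldA_cons (x : List Char) (t : List (List Char)) (hx : x ≠ []) :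
    ((x :: t).foldl pvStepA ([], [])).2 =
      (List.range (x :: t).length).map
        (fun k => PySem.Chars.join ['/'] ((x :: t).take (k + 1))) := by
  have hstep : pvStepA (([] : List Char), ([] : List (List Char))) x = (x, [x]) := by
    simp [pvStepA]
  rw [List.foldl_cons, hstep, foldA_res t x [x] hx,
    List.length_cons, List.range_succ_eq_map, List.map_cons, List.singleton_append]
  congr 1
  · simp [PySem.Chars.join_singleton]
  · rw [List.map_map]
    apply List.map_congr_left
    intro k hk
    simp only [Function.comp]
    have ht : t ≠ [] := by intro hnil; subst hnil; simp at hk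
    have htake : t.take (k + 1) ≠ [] := by simp [List.take_eq_nil_iff, ht]
    rw [List.take_succ_cons, join_cons_of_ne x htake]

-- B's port, reduced to a plain map over List.range of joins of takes
lemma alt_eq (output : String) :
    get_directories_created_by_file_py_alt output =
      (List.range ((PySem.Chars.splitOn output.toList ['/']).dropLast).length).map
        (fun k => String.ofList (PySem.Chars.join ['/']
          (((PySem.Chars.splitOn output.toList ['/']).dropLast).take (k + 1)))) := by
  unfold get_directories_created_by_file_py_alt
  simp only [PySem.List.slice_to_neg_one]
  set l := (PySem.Chars.splitOn output.toList ['/']).dropLast with hl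
  rw [PySem.List.pyRange_one]
  simp only [Int.sub_zero, Int.toNat_natCast, List.map_map]
  apply List.map_congr_left
  intro k hk
  simp only [Function.comp]
  have h1 : ((0 : Int) + k) + 1 = ((k + 1 : Nat) : Int) := by push_cast; ring
  rw [h1, PySem.List.slice_to_natCast]

-- the results component of A's fold always extends the running results list
lemma foldA_prefix (t : List (List Char)) :
    ∀ st : List Char × List (List Char), ∃ s, (t.foldl pvStepA st).2 = st.2 ++ s := by
  induction t with
  | nil => intro st; exact ⟨[], by simp⟩
  | cons a t ih =>
    intro st
    obtain ⟨s, hs⟩ := ih (pvStepA st a)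
    refine ⟨[(if st.1 ≠ [] then st.1 ++ ['/'] else st.1) ++ a] ++ s, ?_⟩
    rw [List.foldl_cons, hs]
    simp [pvStepA, List.append_assoc]

-- ===== VERDICT (by name: the statement is the Claim_ definition above) =====
theorem get_directories_created_by_file_py_spec : Claim_unchanged_get_directories_created_by_file_py := by
  intro output _ hD
  rw [alt_eq]
  unfold get_directories_created_by_file_py
  simp only [PySem.List.slice_to_neg_one]
  set l := (PySem.Chars.splitOn output.toList ['/']).dropLast with hl
  unfold D_get_directories_created_by_file_py at hD
  rw [← hl] at hD
  match l, hD with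
  | [], _ => simp
  | [x], _ =>
    by_cases hx : x = ([] : List Char)
    · subst hx
      simp [pvStepA, PySem.Chars.join_singleton]
    · rw [foldA_cons x [] hx]; simp
  | x :: y :: t, hD =>
    have hx : x ≠ ([] : List Char) := by
      intro hnil; subst hnil
      exact hD ⟨rfl, by simp⟩
    rw [foldA_cons x (y :: t) hx]
    simp

theorem get_directories_created_by_file_py_changed : Claim_changed_get_directories_created_by_file_py := by
  unfold Claim_changed_get_directories_created_by_file_py; decide

theorem get_directories_created_by_file_py_tight : Claim_exact_get_directories_created_by_file_py := by
  intro output _ hD heq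
  obtain ⟨hhead, hlen⟩ := hD
  rw [alt_eq] at heq
  unfold get_directories_created_by_file_py at heq
  simp only [PySem.List.slice_to_neg_one] at heq
  set l := (PySem.Chars.splitOn output.toList ['/']).dropLast with hl
  match l, hhead, hlen with
  | [] :: x :: t, _, _ =>
    -- A's element at index 1 is x; B's is '/' :: x
    have h1 : pvStepA (([] : List Char), ([] : List (List Char))) [] = ([], [[]]) := by
      simp [pvStepA]
    have h2 : pvStepA (([] : List Char), [([] : List Char)]) x = (x, [[], x]) := by
      simp [pvStepA]
    obtain ⟨s, hs⟩ := foldA_prefix t (x, [[], x])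
    have hA : ((([] :: x :: t).foldl pvStepA ([], [])).2).map String.ofList =
        ([String.ofList [], String.ofList x] ++ s.map String.ofList) := by
      rw [List.foldl_cons, h1, List.foldl_cons, h2, hs]; simp
    rw [hA] at heq
    have hB1 : (List.range ([] :: x :: t).length).map
        (fun k => String.ofList (PySem.Chars.join ['/'] ((([] : List Char) :: x :: t).take (k + 1)))) =
        (List.range (t.length + 2)).map
        (fun k => String.ofList (PySem.Chars.join ['/'] ((([] : List Char) :: x :: t).take (k + 1)))) := by
      simp
    rw [hB1] at heq
    have hge : (1 : ℕ) < t.length + 2 := by omega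
    have hL : ([String.ofList [], String.ofList x] ++ s.map String.ofList)[1]? = some (String.ofList x) := by
      rw [List.getElem?_append_left (by simp)]
      rfl
    have hR : ((List.range (t.length + 2)).map
        (fun k => String.ofList (PySem.Chars.join ['/'] ((([] : List Char) :: x :: t).take (k + 1)))))[1]? =
        some (String.ofList ('/' :: x)) := by
      rw [List.getElem?_map, List.getElem?_range hge]
      simp only [Option.map_some]
      congr 2
      show PySem.Chars.join ['/'] [[], x] = '/' :: x
      rw [PySem.Chars.join_cons_cons, PySem.Chars.join_singleton]
      simp
    have hidx : some (String.ofList x) = some (String.ofList ('/' :: x)) := by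
      rw [← hL, ← hR, heq]
    have : x = '/' :: x := by
      have h3 := Option.some.inj hidx
      simpa using congrArg String.toList h3
    exact (List.cons_ne_self '/' x) this.symm
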